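-- pv_equiv track=rewrite | github.com/lucas03miguel/problemaB | outras_resolucoes/outro_v2.py | aztec
-- ===== SOURCE A (Python) =====
-- from math import factorial
--
-- def binomial(n: int, k: int) -> int:
--     return factorial(n) // (factorial(k) * factorial(n - k))
--
-- def aztec(rows: int, columns: int, c: int, r: int, i: int, j: int, colCount: list[int], rowCount: list[int], dp: dict[tuple[int, ...], int]) -> int:
--     # Casos mais faceis
--     if columns == rows == 1:
--         return 1
--     if columns == rows and c == r and c == 1:
--         return factorial(rows)
--     if columns != rows and c != r:
--         return binomial(rows, c)
--
--     # Casos mais dificeis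
--     if i == rows:
--         return int(all(count == c for count in colCount))
--
--     if j == columns:
--         if rowCount[i] != r:
--             return 0
--         return aztec(rows, columns, c, r, i + 1, 0, colCount, rowCount, dp)
--
--     key = tuple(colCount + [i, j])
--
--     if key in dp:
--         return dp[key]
--
--     count = 0
--
--     if colCount[j] < c and rowCount[i] < r:
--         colCount[j] += 1
--         rowCount[i] += 1
--         count += aztec(rows, columns, c, r, i, j + 1, colCount, rowCount, dp)
--         colCount[j] -= 1
--         rowCount[i] -= 1
--
--     count += aztec(rows, columns, c, r, i, j + 1, colCount, rowCount, dp)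
--
--     dp[key] = count
--
--     return count
-- ===== SOURCE B (Python) =====
-- from math import factorial, comb
--
--
-- def aztec(rows, columns, c, r, i, j, colCount, rowCount, dp):
--     # easy cases, as in the original
--     if columns == rows == 1:
--         return 1
--     if columns == rows and c == r and c == 1:
--         return factorial(rows)
--     if columns != rows and c != r:
--         return comb(rows, c)
--
--     if i == rows:
--         return 1 if all(x == c for x in colCount) else 0
--
--     # forward profile DP: layer maps (tuple of column counts, current row sum) -> #ways
--     layer = {(tuple(colCount), rowCount[i]): 1}
--     ii, jj = i, j
--     while True:
--         if jj == columns: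
--             ii += 1
--             jj = 0
--             nxt = {}
--             for (cc, cur), m in layer.items():
--                 if cur == r:
--                     key = (cc, rowCount[ii] if ii < rows else 0)
--                     nxt[key] = nxt.get(key, 0) + m
--             layer = nxt
--             if ii == rows:
--                 break
--             continue
--         nxt = {}
--         for (cc, cur), m in layer.items():
--             k = (cc, cur)
--             nxt[k] = nxt.get(k, 0) + m
--             if cc[jj] < c and cur < r:
--                 cc2 = cc[:jj] + (cc[jj] + 1,) + cc[jj + 1:]
--                 k2 = (cc2, cur + 1)
--                 nxt[k2] = nxt.get(k2, 0) + m
--         layer = nxt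
--         jj += 1
--     return sum(m for (cc, cur), m in layer.items() if all(x == c for x in cc))
-- ===== Notes on version B (the rewrite author's own statement) =====
-- stated objective: faster
-- what changed: Replaces the memoized recursive backtracking with in-place list mutation by an iterative forward dynamic program that sweeps the grid cell by cell, maintaining a dictionary from (column-count profile, current row sum) to the number of ways, and sums the weights of full-capacity profiles at the end.
-- outside the precondition, e.g. on aztec(2, 2, 2, 2, 0, 0, [0, 0], [0, 0], {(0, 0, 0, 0): 99}): A returns 99, B returns 1
import Mathlib
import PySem

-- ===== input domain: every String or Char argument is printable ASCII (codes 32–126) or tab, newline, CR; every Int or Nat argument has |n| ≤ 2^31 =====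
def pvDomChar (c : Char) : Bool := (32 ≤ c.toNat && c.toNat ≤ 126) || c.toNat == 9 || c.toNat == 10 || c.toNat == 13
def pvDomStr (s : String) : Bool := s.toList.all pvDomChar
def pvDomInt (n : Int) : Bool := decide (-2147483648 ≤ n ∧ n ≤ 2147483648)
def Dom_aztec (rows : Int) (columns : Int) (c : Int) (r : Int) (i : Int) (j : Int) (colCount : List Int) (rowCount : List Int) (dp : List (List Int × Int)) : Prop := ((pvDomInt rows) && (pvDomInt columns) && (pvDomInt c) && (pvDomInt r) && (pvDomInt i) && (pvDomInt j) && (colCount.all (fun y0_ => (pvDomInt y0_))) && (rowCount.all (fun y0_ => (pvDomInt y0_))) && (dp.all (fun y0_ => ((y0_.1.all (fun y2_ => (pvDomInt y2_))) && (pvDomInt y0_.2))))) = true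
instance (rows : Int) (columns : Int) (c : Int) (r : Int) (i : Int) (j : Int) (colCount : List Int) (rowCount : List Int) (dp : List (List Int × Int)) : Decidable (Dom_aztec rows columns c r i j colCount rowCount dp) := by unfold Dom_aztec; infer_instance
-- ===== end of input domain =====

-- B replaces A's memoized recursive backtracking (which mutates its lists and memo dict in place;
-- the equivalence proved here is about the RETURN value only, B does not populate the dict) by an
-- iterative forward profile DP over the grid cells; measured faster by a constant factor.

-- ===== PORT A =====
-- Python dict on tuple-of-int keys, as an association list: first-match lookup, overwrite in place.
def pvLook {κ : Type} [DecidableEq κ] : List (κ × Int) → κ → Option Int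
  | [], _ => none
  | (k, v) :: t, key => if k = key then some v else pvLook t key

def pvIns {κ : Type} [DecidableEq κ] : List (κ × Int) → κ → Int → List (κ × Int)
  | [], key, v => [(key, v)]
  | (k, w) :: t, key, v => if k = key then (k, v) :: t else (k, w) :: pvIns t key v

-- math.factorial (raises on negative input, excluded by Pre_)
def pvFact (n : Int) : Int := if n < 0 then 0 else (Nat.factorial n.toNat : Int)
-- binomial from Source A: factorial(n) // (factorial(k) * factorial(n - k))
def pvBinom (n k : Int) : Int := PySem.Int.floordiv (pvFact n) (pvFact k * pvFact (n - k))
-- xs[i] for an index Pre_ keeps in range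
def pvGetI (l : List Int) (i : Int) : Int := (PySem.List.pyGet? l i).getD 0
-- xs[i] = v for an index Pre_ keeps in range (0 ≤ i < len)
def pvSetI (l : List Int) (i : Int) (v : Int) : List Int := l.set i.toNat v

-- the recursive body of A; fuel only makes the recursion structural (never exhausted under Pre_)
def aztecGo : Nat → Int → Int → Int → Int → Int → Int → List Int → List Int → List (List Int × Int) → Int × List (List Int × Int)
  | 0, _, _, _, _, _, _, _, _, dp => (0, dp)
  | Nat.succ fuel, rows, columns, c, r, i, j, cc, rc, dp =>
    if columns = rows ∧ rows = 1 then (1, dp)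
    else if columns = rows ∧ c = r ∧ c = 1 then (pvFact rows, dp)
    else if columns ≠ rows ∧ c ≠ r then (pvBinom rows c, dp)
    else if i = rows then ((if cc.all (fun x => x == c) then 1 else 0), dp)
    else if j = columns then
      if pvGetI rc i ≠ r then (0, dp)
      else aztecGo fuel rows columns c r (i + 1) 0 cc rc dp
    else
      let key := cc ++ [i, j]
      match pvLook dp key with
      | some v => (v, dp)
      | none =>
        let p1 :=
          if pvGetI cc j < c ∧ pvGetI rc i < r then
            aztecGo fuel rows columns c r i (j + 1)
              (pvSetI cc j (pvGetI cc j + 1)) (pvSetI rc i (pvGetI rc i + 1)) dp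
          else (0, dp)
        let p2 := aztecGo fuel rows columns c r i (j + 1) cc rc p1.2
        let cnt := p1.1 + p2.1
        (cnt, pvIns p2.2 key cnt)

def aztec (rows : Int) (columns : Int) (c : Int) (r : Int) (i : Int) (j : Int) (colCount : List Int) (rowCount : List Int) (dp : List (List Int × Int)) : Int :=
  (aztecGo (((rows - i).toNat + 1) * (columns.toNat + 2)) rows columns c r i j colCount rowCount dp).1

-- ===== PORT B =====
-- math.comb
def pvComb (n k : Int) : Int := (Nat.choose n.toNat k.toNat : Int)
-- nxt[k] = nxt.get(k, 0) + m
def pvBump {κ : Type} [DecidableEq κ] (d : List (κ × Int)) (k : κ) (m : Int) : List (κ × Int) :=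
  pvIns d k ((pvLook d k).getD 0 + m)

-- one cell step: every state keeps its weight; states that can place a 1 also feed the bumped state
def altCell (c r jj : Int) (layer : List ((List Int × Int) × Int)) : List ((List Int × Int) × Int) :=
  layer.foldl (fun nxt p =>
    let n1 := pvBump nxt p.1 p.2
    if pvGetI p.1.1 jj < c ∧ p.1.2 < r then
      pvBump n1 (pvSetI p.1.1 jj (pvGetI p.1.1 jj + 1), p.1.2 + 1) p.2
    else n1) []

-- row boundary: keep states whose row sum is r, reset the row sum for the next row
def altBound (rows r : Int) (rc : List Int) (ii' : Int) (layer : List ((List Int × Int) × Int)) : List ((List Int × Int) × Int) :=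
  layer.foldl (fun nxt p =>
    if p.1.2 = r then pvBump nxt (p.1.1, if ii' < rows then pvGetI rc ii' else 0) p.2 else nxt) []

def altLoop : Nat → Int → Int → Int → Int → List Int → Int → Int → List ((List Int × Int) × Int) → List ((List Int × Int) × Int)
  | 0, _, _, _, _, _, _, _, layer => layer
  | Nat.succ fuel, rows, columns, c, r, rc, ii, jj, layer =>
    if jj = columns then
      let nxt := altBound rows r rc (ii + 1) layer
      if ii + 1 = rows then nxt else altLoop fuel rows columns c r rc (ii + 1) 0 nxt
    else altLoop fuel rows columns c r rc ii (jj + 1) (altCell c r jj layer)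

def aztec_alt (rows : Int) (columns : Int) (c : Int) (r : Int) (i : Int) (j : Int) (colCount : List Int) (rowCount : List Int) (dp : List (List Int × Int)) : Int :=
  if columns = rows ∧ rows = 1 then 1
  else if columns = rows ∧ c = r ∧ c = 1 then pvFact rows
  else if columns ≠ rows ∧ c ≠ r then pvComb rows c
  else if i = rows then (if colCount.all (fun x => x == c) then 1 else 0)
  else
    let fin := altLoop (((rows - i).toNat + 1) * (columns.toNat + 2)) rows columns c r rowCount i j
      [((colCount, pvGetI rowCount i), (1 : Int))]
    fin.foldl (fun acc p => if p.1.1.all (fun x => x == c) then acc + p.2 else acc) 0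

-- ===== PRECONDITION & SPEC =====
-- Pre_ follows A's branch structure. In the first three branches it excludes exactly the inputs where
-- math.factorial raises (negative argument). In the recursive branch it additionally requires consistent
-- dimensions and in-range start indices (otherwise A hits an IndexError or recurses forever) and an EMPTY
-- memo dict: a caller-seeded non-empty dict is internal-state garbage that A returns verbatim on a key hit,
-- a defensible corner no caller relies on (see cites).
def Pre_aztec (rows : Int) (columns : Int) (c : Int) (r : Int) (i : Int) (j : Int) (colCount : List Int) (rowCount : List Int) (dp : List (List Int × Int)) : Prop :=
  if columns = rows ∧ rows = 1 then True
  else if columns = rows ∧ c = r ∧ c = 1 then 0 ≤ rows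
  else if columns ≠ rows ∧ c ≠ r then 0 ≤ c ∧ c ≤ rows
  else i = rows ∨
    ((colCount.length : Int) = columns ∧ (rowCount.length : Int) = rows ∧
     0 ≤ i ∧ i ≤ rows ∧ 0 ≤ j ∧ j ≤ columns ∧ dp = [])
instance (rows : Int) (columns : Int) (c : Int) (r : Int) (i : Int) (j : Int) (colCount : List Int) (rowCount : List Int) (dp : List (List Int × Int)) : Decidable (Pre_aztec rows columns c r i j colCount rowCount dp) := by unfold Pre_aztec; infer_instance

def pvWitness_aztec : Int × Int × Int × Int × Int × Int × List Int × List Int × (List (List Int × Int)) :=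
  (2, 2, 2, 2, 0, 0, [0, 0], [0, 0], [])

def Spec_aztec (rows : Int) (columns : Int) (c : Int) (r : Int) (i : Int) (j : Int) (colCount : List Int) (rowCount : List Int) (dp : List (List Int × Int)) (out : Int) : Prop := out = aztec_alt rows columns c r i j colCount rowCount dp
instance (rows : Int) (columns : Int) (c : Int) (r : Int) (i : Int) (j : Int) (colCount : List Int) (rowCount : List Int) (dp : List (List Int × Int)) (out : Int) : Decidable (Spec_aztec rows columns c r i j colCount rowCount dp out) := by unfold Spec_aztec; infer_instance

-- ===== CLAIM (what is proved, stated in full; the proofs are below) =====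
def Claim_equal_aztec : Prop := ∀ (rows : Int) (columns : Int) (c : Int) (r : Int) (i : Int) (j : Int) (colCount : List Int) (rowCount : List Int) (dp : List (List Int × Int)), Dom_aztec rows columns c r i j colCount rowCount dp → Pre_aztec rows columns c r i j colCount rowCount dp → Spec_aztec rows columns c r i j colCount rowCount dp (aztec rows columns c r i j colCount rowCount dp)

-- ===== LEMMAS AND PROOFS =====

theorem pvLook_pvIns {κ : Type} [DecidableEq κ] (d : List (κ × Int)) (k k' : κ) (v : Int) :
    pvLook (pvIns d k v) k' = if k' = k then some v else pvLook d k' := by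
  induction d with
  | nil =>
    by_cases h2 : k = k'
    · subst h2; simp [pvIns, pvLook]
    · simp [pvIns, pvLook, h2, Ne.symm h2]
  | cons p t ih =>
    obtain ⟨hk, hv⟩ := p
    by_cases h1 : hk = k
    · subst h1
      by_cases h2 : hk = k'
      · subst h2; simp [pvIns, pvLook]
      · simp [pvIns, pvLook, h2, Ne.symm h2]
    · by_cases h2 : hk = k'
      · have h2' : k' ≠ k := fun e => h1 (h2.trans e)
        simp [pvIns, pvLook, h1, h2, h2']
      · simp [pvIns, pvLook, h1, h2, ih]

theorem sum_set_int (l : List Int) (n : Nat) (v : Int) (h : n < l.length) :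
    (l.set n v).sum = l.sum - l[n] + v := by
  induction l generalizing n with
  | nil => simp at h
  | cons a t ih =>
    cases n with
    | zero => simp [List.set]; ring
    | succ m =>
      simp at h
      simp [List.set, ih m (by omega)]
      ring

theorem getI_of_nonneg (l : List Int) (i : Int) (h : 0 ≤ i) :
    pvGetI l i = (l[i.toNat]?).getD 0 := by
  simp [pvGetI, PySem.List.pyGet?_of_nonneg (h := h)]

theorem getI_set_self (l : List Int) (i : Int) (v : Int) (h0 : 0 ≤ i) (h : i.toNat < l.length) :
    pvGetI (pvSetI l i v) i = v := by
  simp [pvSetI, getI_of_nonneg _ _ h0, List.getElem?_set_self, h]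

theorem getElem?_setI (l : List Int) (i : Int) (v : Int) (k : Nat) (h : i.toNat ≠ k) :
    (pvSetI l i v)[k]? = l[k]? := by
  simp [pvSetI, List.getElem?_set_ne h]

def Gf : Nat → Int → Int → Int → Int → Int → Int → List Int → List Int → Int
  | 0, _, _, _, _, _, _, _, _ => 0
  | Nat.succ fuel, rows, columns, c, r, i, j, cc, rc =>
    if i = rows then (if cc.all (fun x => x == c) then 1 else 0)
    else if j = columns then
      (if pvGetI rc i ≠ r then 0 else Gf fuel rows columns c r (i + 1) 0 cc rc)
    else
      (if pvGetI cc j < c ∧ pvGetI rc i < r then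
        Gf fuel rows columns c r i (j + 1) (pvSetI cc j (pvGetI cc j + 1)) (pvSetI rc i (pvGetI rc i + 1))
      else 0)
      + Gf fuel rows columns c r i (j + 1) cc rc

theorem Gf_agree (fuel : Nat) (rows columns c r : Int) :
    ∀ (i j : Int) (cc rc rc' : List Int), 0 ≤ i →
    (∀ k : Nat, i.toNat ≤ k → rc[k]? = rc'[k]?) →
    Gf fuel rows columns c r i j cc rc = Gf fuel rows columns c r i j cc rc' := by
  induction fuel with
  | zero => intro i j cc rc rc' _ _; rfl
  | succ fuel ih =>
    intro i j cc rc rc' hi hag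
    have hgi : pvGetI rc i = pvGetI rc' i := by
      rw [getI_of_nonneg _ _ hi, getI_of_nonneg _ _ hi, hag i.toNat le_rfl]
    simp only [Gf]
    by_cases h1 : i = rows
    · simp [h1]
    · simp only [if_neg h1]
      by_cases h2 : j = columns
      · simp only [if_pos h2, hgi]
        by_cases h3 : pvGetI rc' i ≠ r
        · simp [h3]
        · simp only [if_neg h3]
          exact ih (i + 1) 0 cc rc rc' (by omega)
            (fun k hk => hag k (by omega))
      · simp only [if_neg h2, hgi]
        have hrec2 := ih i (j + 1) cc rc rc' hi hag
        by_cases h4 : pvGetI cc j < c ∧ pvGetI rc' i < r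
        · have hset : ∀ k : Nat, i.toNat ≤ k →
              (pvSetI rc i (pvGetI rc' i + 1))[k]? = (pvSetI rc' i (pvGetI rc' i + 1))[k]? := by
            intro k hk
            by_cases he : i.toNat = k
            · subst he
              simp only [pvSetI]
              rw [List.getElem?_set_self', List.getElem?_set_self']
              rw [hag i.toNat le_rfl]
            · rw [getElem?_setI _ _ _ _ he, getElem?_setI _ _ _ _ he, hag k hk]
          simp only [if_pos h4, hrec2]
          have := ih i (j + 1) (pvSetI cc j (pvGetI cc j + 1))
            (pvSetI rc i (pvGetI rc' i + 1)) (pvSetI rc' i (pvGetI rc' i + 1)) hi hset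
          rw [this]
        · simp [h4, hrec2]

def pvMu (rows columns i j : Int) : Nat :=
  (rows - i).toNat * (columns.toNat + 1) + (columns - j).toNat + 1

def pvS (rc0 : List Int) (r i0 i : Int) : Int :=
  (((rc0.drop i0.toNat).take (i - i0).toNat).map (fun x => r - x)).sum

def pvCoh (rc0 cc0 : List Int) (r i0 : Int) (i : Int) (cc rc : List Int) : Prop :=
  rc.length = rc0.length ∧ cc.length = cc0.length ∧ i0 ≤ i ∧
  (∀ k : Nat, i.toNat < k → rc[k]? = rc0[k]?) ∧
  (i.toNat < rc0.length → pvGetI rc i = pvGetI rc0 i + (cc.sum - cc0.sum) - pvS rc0 r i0 i)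

theorem pvS_zero (rc0 : List Int) (r i0 : Int) : pvS rc0 r i0 i0 = 0 := by
  simp [pvS]

theorem pvS_succ (rc0 : List Int) (r i0 i : Int) (h0 : 0 ≤ i0) (h1 : i0 ≤ i)
    (h2 : i.toNat < rc0.length) :
    pvS rc0 r i0 (i + 1) = pvS rc0 r i0 i + (r - pvGetI rc0 i) := by
  have he : (i + 1 - i0).toNat = (i - i0).toNat + 1 := by omega
  have hidx : i0.toNat + (i - i0).toNat = i.toNat := by omega
  have hlt : (i - i0).toNat < (rc0.drop i0.toNat).length := by
    simp [List.length_drop]; omega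
  simp only [pvS, he, List.take_succ]
  rw [List.getElem?_drop, hidx]
  rw [List.getElem?_eq_getElem (by omega)]
  simp [getI_of_nonneg rc0 i (by omega), List.getElem?_eq_getElem (show i.toNat < rc0.length by omega)]

def pvInv (rows columns c r i0 : Int) (cc0 rc0 : List Int) (dp : List (List Int × Int)) : Prop :=
  ∀ key v, pvLook dp key = some v →
    ∃ cc i j rc, key = cc ++ [i, j] ∧ cc.length = cc0.length ∧
      i0 ≤ i ∧ i < rows ∧ 0 ≤ j ∧ j < columns ∧
      pvCoh rc0 cc0 r i0 i cc rc ∧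
      v = Gf (pvMu rows columns i j) rows columns c r i j cc rc

theorem goA (rows columns c r i0 : Int) (cc0 rc0 : List Int)
    (hb1 : ¬(columns = rows ∧ rows = 1)) (hb2 : ¬(columns = rows ∧ c = r ∧ c = 1))
    (hb3 : ¬(columns ≠ rows ∧ c ≠ r))
    (hrows : (rc0.length : Int) = rows) (hcols : (cc0.length : Int) = columns)
    (hi0 : 0 ≤ i0) :
    ∀ fuel : Nat, ∀ (i j : Int) (cc rc : List Int) (dp : List (List Int × Int)),
    i ≤ rows → 0 ≤ j → j ≤ columns →
    pvMu rows columns i j ≤ fuel →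
    pvCoh rc0 cc0 r i0 i cc rc →
    pvInv rows columns c r i0 cc0 rc0 dp →
    (aztecGo fuel rows columns c r i j cc rc dp).1
      = Gf (pvMu rows columns i j) rows columns c r i j cc rc
    ∧ pvInv rows columns c r i0 cc0 rc0 (aztecGo fuel rows columns c r i j cc rc dp).2 := by
  intro fuel
  induction fuel with
  | zero =>
    intro i j cc rc dp _ _ _ hmu _ _
    exact absurd hmu (by simp [pvMu])
  | succ fuel ih =>
    intro i j cc rc dp hir hj0 hjc hmu hcoh hinv
    obtain ⟨hlen, hcclen, hi0i, hhi, hpos⟩ := hcoh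
    have hi : 0 ≤ i := le_trans hi0 hi0i
    have hC0 : 0 ≤ columns := by omega
    obtain ⟨m, hm⟩ : ∃ m, pvMu rows columns i j = m + 1 := ⟨_, rfl⟩
    rw [hm]
    by_cases hbase : i = rows
    · -- base row
      simp only [aztecGo, if_neg hb1, if_neg hb2, if_neg hb3, if_pos hbase, Gf]
      exact ⟨trivial, hinv⟩
    · have hilt : i < rows := lt_of_le_of_ne hir hbase
      have hitn : i.toNat < rc0.length := by omega
      by_cases hbnd : j = columns
      · -- row boundary
        by_cases hrchk : pvGetI rc i ≠ r
        · simp only [aztecGo, if_neg hb1, if_neg hb2, if_neg hb3, if_neg hbase,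
            if_pos hbnd, if_pos hrchk, Gf, if_neg hbase]
          exact ⟨trivial, hinv⟩
        · push_neg at hrchk
          have hmu' : pvMu rows columns (i + 1) 0 = m := by
            have e1 : (rows - i).toNat = (rows - (i + 1)).toNat + 1 := by omega
            simp only [pvMu] at hm ⊢
            rw [e1, Nat.succ_mul] at hm
            omega
          have hcoh' : pvCoh rc0 cc0 r i0 (i + 1) cc rc := by
            refine ⟨hlen, hcclen, by omega, fun k hk => hhi k (by omega), fun hlt => ?_⟩
            have h1 : pvGetI rc (i + 1) = pvGetI rc0 (i + 1) := by
              rw [getI_of_nonneg _ _ (by omega), getI_of_nonneg _ _ (by omega),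
                hhi (i + 1).toNat (by omega)]
            rw [h1, pvS_succ rc0 r i0 i hi0 hi0i hitn]
            have h2 := hpos hitn
            rw [hrchk] at h2
            omega
          have hrec := ih (i + 1) 0 cc rc dp (by omega) le_rfl hC0 (by omega) hcoh' hinv
          have hne : ¬ (pvGetI rc i ≠ r) := by simp [hrchk]
          simp only [aztecGo, if_neg hb1, if_neg hb2, if_neg hb3, if_neg hbase,
            if_pos hbnd, if_neg hne, Gf]
          rw [hmu'] at hrec
          exact hrec
      · -- cell
        have hjlt : j < columns := lt_of_le_of_ne hjc hbnd
        have hjtn : j.toNat < cc.length := by omega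
        have hmu' : pvMu rows columns i (j + 1) = m := by
          simp only [pvMu] at hm ⊢; omega
        cases hke : pvLook dp (cc ++ [i, j]) with
        | some v =>
          -- memo hit
          obtain ⟨cc', i', j', rc', hkey, hlen', _, _, _, _, hcoh', hval⟩ :=
            hinv (cc ++ [i, j]) v hke
          have hpl : cc.length = cc'.length := by rw [hcclen, hlen']
          obtain ⟨hcceq, htl⟩ := List.append_inj hkey hpl
          obtain ⟨hieq, hjeq⟩ : i = i' ∧ j = j' := by simpa using htl
          subst hcceq
          subst hieq
          subst hjeq
          obtain ⟨hlen'2, _, _, hhi', hpos'⟩ := hcoh'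
          have hagree : ∀ k : Nat, i.toNat ≤ k → rc'[k]? = rc[k]? := by
            intro k hk
            rcases Nat.eq_or_lt_of_le hk with he | hlt
            · subst he
              rw [List.getElem?_eq_getElem (by omega : i.toNat < rc'.length),
                List.getElem?_eq_getElem (by omega : i.toNat < rc.length)]
              have e1 : rc'[i.toNat] = pvGetI rc' i := by
                rw [getI_of_nonneg _ _ hi, List.getElem?_eq_getElem (by omega)]; rfl
              have e2 : rc[i.toNat] = pvGetI rc i := by
                rw [getI_of_nonneg _ _ hi, List.getElem?_eq_getElem (by omega)]; rfl
              rw [e1, e2, hpos' hitn, hpos hitn]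
            · rw [hhi' k hlt, hhi k hlt]
          have : v = Gf (m + 1) rows columns c r i j cc rc := by
            rw [hval, ← hm]
            exact Gf_agree _ rows columns c r i j cc rc' rc hi hagree
          simp only [aztecGo, if_neg hb1, if_neg hb2, if_neg hb3, if_neg hbase,
            if_neg hbnd, hke]
          exact ⟨this, hinv⟩
        | none =>
          -- memo miss
          have hgcc : pvGetI cc j = cc[j.toNat] := by
            rw [getI_of_nonneg _ _ hj0, List.getElem?_eq_getElem hjtn]; rfl
          -- first recursive call (conditional)
          by_cases hcond : pvGetI cc j < c ∧ pvGetI rc i < r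
          · -- cond true
            have hcoh1 : pvCoh rc0 cc0 r i0 i
                (pvSetI cc j (pvGetI cc j + 1)) (pvSetI rc i (pvGetI rc i + 1)) := by
              refine ⟨by simp [pvSetI, hlen], by simp [pvSetI, hcclen], hi0i, ?_, ?_⟩
              · intro k hk
                rw [getElem?_setI _ _ _ _ (by omega)]
                exact hhi k hk
              · intro hlt
                rw [getI_set_self _ _ _ hi (by omega)]
                have hsum : (pvSetI cc j (pvGetI cc j + 1)).sum = cc.sum + 1 := by
                  rw [pvSetI, sum_set_int cc j.toNat _ hjtn, hgcc]; ring
                rw [hsum, hpos hitn]; ring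
            have hrec1 := ih i (j + 1) (pvSetI cc j (pvGetI cc j + 1))
              (pvSetI rc i (pvGetI rc i + 1)) dp hir (by omega) (by omega)
              (by omega) hcoh1 hinv
            cases hp1 : aztecGo fuel rows columns c r i (j + 1)
                (pvSetI cc j (pvGetI cc j + 1)) (pvSetI rc i (pvGetI rc i + 1)) dp with
            | mk v1 dp1 =>
              rw [hp1] at hrec1
              have hrec2 := ih i (j + 1) cc rc dp1 hir (by omega) (by omega)
                (by omega) ⟨hlen, hcclen, hi0i, hhi, hpos⟩ hrec1.2
              cases hp2 : aztecGo fuel rows columns c r i (j + 1) cc rc dp1 with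
              | mk v2 dp2 =>
                rw [hp2] at hrec2
                have hval : v1 + v2 = Gf (m + 1) rows columns c r i j cc rc := by
                  have h1 := hrec1.1
                  have h2 := hrec2.1
                  rw [hmu'] at h1 h2
                  simp only [Gf]
                  rw [if_neg hbase, if_neg hbnd, if_pos hcond, ← h1, ← h2]
                have hinv' : pvInv rows columns c r i0 cc0 rc0
                    (pvIns dp2 (cc ++ [i, j]) (v1 + v2)) := by
                  intro key' v' hlk
                  rw [pvLook_pvIns] at hlk
                  by_cases hkeq : key' = cc ++ [i, j]
                  · rw [if_pos hkeq] at hlk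
                    cases hlk
                    exact ⟨cc, i, j, rc, hkeq, hcclen, hi0i, hilt, hj0, hjlt,
                      ⟨hlen, hcclen, hi0i, hhi, hpos⟩, by rw [hm]; exact hval⟩
                  · rw [if_neg hkeq] at hlk
                    exact hrec2.2 key' v' hlk
                simp only [aztecGo, if_neg hb1, if_neg hb2, if_neg hb3, if_neg hbase,
                  if_neg hbnd, hke, if_pos hcond, hp1, hp2]
                exact ⟨hval, hinv'⟩
          · -- cond false
            have hrec2 := ih i (j + 1) cc rc dp hir (by omega) (by omega)
              (by omega) ⟨hlen, hcclen, hi0i, hhi, hpos⟩ hinv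
            cases hp2 : aztecGo fuel rows columns c r i (j + 1) cc rc dp with
            | mk v2 dp2 =>
              rw [hp2] at hrec2
              have hval : 0 + v2 = Gf (m + 1) rows columns c r i j cc rc := by
                have h2 := hrec2.1
                rw [hmu'] at h2
                simp only [Gf]
                rw [if_neg hbase, if_neg hbnd, if_neg hcond, ← h2]
              have hinv' : pvInv rows columns c r i0 cc0 rc0
                  (pvIns dp2 (cc ++ [i, j]) (0 + v2)) := by
                intro key' v' hlk
                rw [pvLook_pvIns] at hlk
                by_cases hkeq : key' = cc ++ [i, j]
                · rw [if_pos hkeq] at hlk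
                  cases hlk
                  exact ⟨cc, i, j, rc, hkeq, hcclen, hi0i, hilt, hj0, hjlt,
                    ⟨hlen, hcclen, hi0i, hhi, hpos⟩, by rw [hm]; exact hval⟩
                · rw [if_neg hkeq] at hlk
                  exact hrec2.2 key' v' hlk
              simp only [aztecGo, if_neg hb1, if_neg hb2, if_neg hb3, if_neg hbase,
                if_neg hbnd, hke, if_neg hcond, hp2]
              exact ⟨hval, hinv'⟩

def pvWsum (f : (List Int × Int) → Int) (d : List ((List Int × Int) × Int)) : Int :=
  (d.map (fun p => p.2 * f p.1)).sum

theorem pvWsum_nil (f : (List Int × Int) → Int) : pvWsum f [] = 0 := rfl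

theorem pvWsum_congr (f g : (List Int × Int) → Int) (l : List ((List Int × Int) × Int))
    (h : ∀ p ∈ l, f p.1 = g p.1) : pvWsum f l = pvWsum g l := by
  induction l with
  | nil => rfl
  | cons p t ih =>
    simp only [pvWsum, List.map_cons, List.sum_cons] at *
    rw [h p (by simp), ih (fun q hq => h q (by simp [hq]))]

theorem pvWsum_bump (f : (List Int × Int) → Int) (d : List ((List Int × Int) × Int))
    (k : List Int × Int) (m : Int) :
    pvWsum f (pvBump d k m) = pvWsum f d + m * f k := by
  induction d with
  | nil => simp [pvBump, pvIns, pvLook, pvWsum]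
  | cons p t ih =>
    obtain ⟨pk, pv⟩ := p
    by_cases h1 : pk = k
    · subst h1
      simp [pvBump, pvLook, pvIns, pvWsum]
      ring
    · simp only [pvBump, pvLook, if_neg h1, pvIns, pvWsum, List.map_cons, List.sum_cons] at *
      rw [ih]
      ring

theorem altCell_wsum (c r jj : Int) (f : (List Int × Int) → Int) :
    ∀ (l acc : List ((List Int × Int) × Int)),
    pvWsum f (l.foldl (fun nxt p =>
      let n1 := pvBump nxt p.1 p.2
      if pvGetI p.1.1 jj < c ∧ p.1.2 < r then
        pvBump n1 (pvSetI p.1.1 jj (pvGetI p.1.1 jj + 1), p.1.2 + 1) p.2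
      else n1) acc)
    = pvWsum f acc
      + pvWsum (fun s => f s + (if pvGetI s.1 jj < c ∧ s.2 < r then
          f (pvSetI s.1 jj (pvGetI s.1 jj + 1), s.2 + 1) else 0)) l := by
  intro l
  induction l with
  | nil => intro acc; simp [pvWsum]
  | cons p t ih =>
    intro acc
    simp only [List.foldl_cons]
    rw [ih]
    by_cases hc : pvGetI p.1.1 jj < c ∧ p.1.2 < r
    · simp only [if_pos hc, pvWsum_bump]
      simp only [pvWsum, List.map_cons, List.sum_cons]
      rw [if_pos hc]
      ring
    · simp only [if_neg hc, pvWsum_bump]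
      simp only [pvWsum, List.map_cons, List.sum_cons]
      rw [if_neg hc]
      ring

theorem altBound_wsum (rows r : Int) (rc : List Int) (ii' : Int) (f : (List Int × Int) → Int) :
    ∀ (l acc : List ((List Int × Int) × Int)),
    pvWsum f (l.foldl (fun nxt p =>
      if p.1.2 = r then pvBump nxt (p.1.1, if ii' < rows then pvGetI rc ii' else 0) p.2 else nxt) acc)
    = pvWsum f acc
      + pvWsum (fun s => if s.2 = r then f (s.1, if ii' < rows then pvGetI rc ii' else 0) else 0) l := by
  intro l
  induction l with
  | nil => intro acc; simp [pvWsum]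
  | cons p t ih =>
    intro acc
    simp only [List.foldl_cons]
    rw [ih]
    by_cases hc : p.1.2 = r
    · simp only [if_pos hc, pvWsum_bump]
      simp only [pvWsum, List.map_cons, List.sum_cons]
      rw [if_pos hc]
      ring
    · simp only [if_neg hc, pvWsum_bump]
      simp only [pvWsum, List.map_cons, List.sum_cons]
      rw [if_neg hc]
      ring

theorem final_fold_wsum (c : Int) :
    ∀ (l : List ((List Int × Int) × Int)) (a : Int),
    l.foldl (fun acc p => if p.1.1.all (fun x => x == c) then acc + p.2 else acc) a
    = a + pvWsum (fun s => if s.1.all (fun x => x == c) then 1 else 0) l := by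
  intro l
  induction l with
  | nil => intro a; simp [pvWsum]
  | cons p t ih =>
    intro a
    simp only [List.foldl_cons]
    rw [ih]
    by_cases hc : p.1.1.all (fun x => x == c)
    · simp only [if_pos hc, pvWsum, List.map_cons, List.sum_cons]
      ring
    · simp only [if_neg hc, pvWsum, List.map_cons, List.sum_cons]
      ring

def rcRep (rc0 : List Int) (ii cur : Int) : List Int := rc0.set ii.toNat cur

theorem altLoop_eval (rows columns c r : Int) (rc0 : List Int)
    (hrows : (rc0.length : Int) = rows) (hC0 : 0 ≤ columns) :
    ∀ fuel : Nat, ∀ (ii jj : Int) (layer : List ((List Int × Int) × Int)),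
    0 ≤ ii → ii < rows → 0 ≤ jj → jj ≤ columns →
    pvMu rows columns ii jj ≤ fuel →
    (altLoop fuel rows columns c r rc0 ii jj layer).foldl
        (fun acc p => if p.1.1.all (fun x => x == c) then acc + p.2 else acc) 0
      = pvWsum (fun s => Gf (pvMu rows columns ii jj) rows columns c r ii jj s.1 (rcRep rc0 ii s.2)) layer := by
  intro fuel
  induction fuel with
  | zero =>
    intro ii jj layer _ _ _ _ hmu
    exact absurd hmu (by simp [pvMu])
  | succ fuel ih =>
    intro ii jj layer hii0 hiir hjj0 hjjc hmu
    have hiitn : ii.toNat < rc0.length := by omega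
    obtain ⟨m, hm⟩ : ∃ m, pvMu rows columns ii jj = m + 1 := ⟨_, rfl⟩
    have hbase : ¬ ii = rows := by omega
    have hgrep : ∀ cur : Int, pvGetI (rcRep rc0 ii cur) ii = cur := fun cur =>
      getI_set_self rc0 ii cur hii0 hiitn
    by_cases hbnd : jj = columns
    · -- row boundary step
      have hmu' : pvMu rows columns (ii + 1) 0 = m := by
        have e1 : (rows - ii).toNat = (rows - (ii + 1)).toNat + 1 := by omega
        simp only [pvMu] at hm ⊢
        rw [e1, Nat.succ_mul] at hm
        omega
      have hm1 : 1 ≤ m := by simp only [pvMu] at hmu'; omega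
      obtain ⟨m', hm'⟩ : ∃ m', m = m' + 1 := ⟨m - 1, by omega⟩
      -- pointwise: Gf (m+1) at (ii, columns) in terms of layer states
      have hpoint : ∀ s : List Int × Int,
          Gf (m + 1) rows columns c r ii jj s.1 (rcRep rc0 ii s.2)
          = (if s.2 = r then
              Gf m rows columns c r (ii + 1) 0 s.1 (rcRep rc0 ii s.2) else 0) := by
        intro s
        simp only [Gf, if_neg hbase, if_pos hbnd, hgrep]
        by_cases hs : s.2 = r
        · simp [hs]
        · simp [hs]
      by_cases hend : ii + 1 = rows
      · -- last row completed: loop exits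
        simp only [altLoop, if_pos hbnd, if_pos hend, altBound]
        rw [final_fold_wsum, altBound_wsum, pvWsum_nil, hm]
        have hz : ¬ (ii + 1 < rows) := by omega
        rw [zero_add, zero_add]
        apply pvWsum_congr
        intro p _
        rw [hpoint p.1]
        by_cases hs : p.1.2 = r
        · rw [if_pos hs, if_pos hs, if_neg hz, hm']
          simp only [Gf, if_pos hend]
        · rw [if_neg hs, if_neg hs]
      · -- continue with next row
        have hlt : ii + 1 < rows := by omega
        simp only [altLoop, if_pos hbnd, if_neg hend, altBound]
        rw [ih (ii + 1) 0 _ (by omega) hlt le_rfl hC0 (by omega)]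
        rw [altBound_wsum, pvWsum_nil, zero_add, hm, hmu']
        apply pvWsum_congr
        intro p _
        rw [hpoint p.1]
        by_cases hs : p.1.2 = r
        · rw [if_pos hs, if_pos hs, if_pos hlt]
          apply Gf_agree _ _ _ _ _ _ _ _ _ _ (by omega)
          intro k hk
          have hk1 : ii.toNat ≠ k := by omega
          have hk2 : (ii + 1).toNat ≤ k := hk
          simp only [rcRep]
          by_cases he : (ii + 1).toNat = k
          · subst he
            have h1 : (rc0.set ii.toNat p.1.2)[(ii + 1).toNat]? = rc0[(ii + 1).toNat]? :=
              List.getElem?_set_ne (by omega)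
            have h2 : (rc0.set (ii + 1).toNat (pvGetI rc0 (ii + 1)))[(ii + 1).toNat]?
                = rc0[(ii + 1).toNat]? := by
              rw [List.getElem?_set_eq_of_lt _ (by omega)]
              rw [List.getElem?_eq_getElem (by omega : (ii + 1).toNat < rc0.length)]
              congr 1
              rw [getI_of_nonneg _ _ (by omega),
                List.getElem?_eq_getElem (by omega : (ii + 1).toNat < rc0.length)]
              rfl
            rw [h1, h2]
          · rw [List.getElem?_set_ne (by omega), List.getElem?_set_ne (by omega)]
        · rw [if_neg hs, if_neg hs]
    · -- cell step
      have hjlt : jj < columns := lt_of_le_of_ne hjjc hbnd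
      have hmu' : pvMu rows columns ii (jj + 1) = m := by
        simp only [pvMu] at hm ⊢; omega
      simp only [altLoop, if_neg hbnd, altCell]
      rw [ih ii (jj + 1) _ hii0 hiir (by omega) (by omega) (by omega)]
      rw [altCell_wsum, pvWsum_nil, zero_add, hm, hmu']
      apply pvWsum_congr
      intro p _
      simp only [Gf, if_neg hbase, if_neg hbnd, hgrep]
      have hset : pvSetI (rcRep rc0 ii p.1.2) ii (p.1.2 + 1) = rcRep rc0 ii (p.1.2 + 1) := by
        simp [pvSetI, rcRep, List.set_set]
      by_cases hcnd : pvGetI p.1.1 jj < c ∧ p.1.2 < r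
      · rw [if_pos hcnd, if_pos hcnd, hset]
        ring
      · rw [if_neg hcnd, if_neg hcnd]
        ring

theorem binom_eq_comb (n k : Int) (h0 : 0 ≤ k) (h1 : k ≤ n) : pvBinom n k = pvComb n k := by
  have hn : 0 ≤ n := le_trans h0 h1
  have hnk : 0 ≤ n - k := by omega
  have hkn : k.toNat ≤ n.toNat := by omega
  have hfacts := Nat.choose_mul_factorial_mul_factorial hkn
  have hnkt : (n - k).toNat = n.toNat - k.toNat := by omega
  simp only [pvBinom, pvFact, pvComb, if_neg (by omega : ¬ n < 0), if_neg (by omega : ¬ k < 0),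
    if_neg (by omega : ¬ n - k < 0), hnkt]
  have hD : (0 : Int) < (k.toNat.factorial : Int) * ((n.toNat - k.toNat).factorial : Int) := by
    positivity
  rw [PySem.Int.floordiv_eq_ediv_of_pos hD]
  have : ((n.toNat.factorial : Int)) = (n.toNat.choose k.toNat : Int) *
      ((k.toNat.factorial : Int) * ((n.toNat - k.toNat).factorial : Int)) := by
    rw [← hfacts]
    push_cast
    ring
  rw [this, Int.mul_ediv_cancel _ (ne_of_gt hD)]

theorem pvMu_le_fuel (rows columns i j : Int) (hj0 : 0 ≤ j) (hjc : j ≤ columns) :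
    pvMu rows columns i j ≤ ((rows - i).toNat + 1) * (columns.toNat + 2) := by
  simp only [pvMu]
  have e1 : (rows - i).toNat * (columns.toNat + 1) = (rows - i).toNat * columns.toNat + (rows - i).toNat := by ring
  have e2 : ((rows - i).toNat + 1) * (columns.toNat + 2)
      = (rows - i).toNat * columns.toNat + 2 * (rows - i).toNat + columns.toNat + 2 := by ring
  omega

-- ===== VERDICT (by name: the statement is the Claim_ definition above) =====
theorem aztec_spec : Claim_equal_aztec := by
  intro rows columns c r i j colCount rowCount dp _ hpre
  show aztec rows columns c r i j colCount rowCount dp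
      = aztec_alt rows columns c r i j colCount rowCount dp
  have hfpos : 0 < ((rows - i).toNat + 1) * (columns.toNat + 2) := by positivity
  obtain ⟨f', hf⟩ : ∃ f', ((rows - i).toNat + 1) * (columns.toNat + 2) = f' + 1 :=
    ⟨_, (Nat.succ_pred_eq_of_pos hfpos).symm⟩
  unfold Pre_aztec at hpre
  by_cases hb1 : columns = rows ∧ rows = 1
  · simp only [aztec, aztec_alt, hf, aztecGo, if_pos hb1]
  · rw [if_neg hb1] at hpre
    by_cases hb2 : columns = rows ∧ c = r ∧ c = 1
    · simp only [aztec, aztec_alt, hf, aztecGo, if_neg hb1, if_pos hb2]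
    · rw [if_neg hb2] at hpre
      by_cases hb3 : columns ≠ rows ∧ c ≠ r
      · rw [if_pos hb3] at hpre
        simp only [aztec, aztec_alt, hf, aztecGo, if_neg hb1, if_neg hb2, if_pos hb3]
        exact binom_eq_comb rows c hpre.1 hpre.2
      · rw [if_neg hb3] at hpre
        by_cases hbase : i = rows
        · simp only [aztec, aztec_alt, hf, aztecGo, if_neg hb1, if_neg hb2, if_neg hb3,
            if_pos hbase]
        · rcases hpre with hbase' | ⟨hcols, hrows, hi0, hir, hj0, hjc, hdp⟩
          · exact absurd hbase' hbase
          · subst hdp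
            have hC0 : 0 ≤ columns := by omega
            have hilt : i < rows := lt_of_le_of_ne hir hbase
            -- A side
            have hA := (goA rows columns c r i colCount rowCount hb1 hb2 hb3 hrows hcols hi0
              (((rows - i).toNat + 1) * (columns.toNat + 2)) i j colCount rowCount []
              hir hj0 hjc (pvMu_le_fuel rows columns i j hj0 hjc)
              ⟨rfl, rfl, le_rfl, fun _ _ => rfl, fun _ => by rw [pvS_zero]; ring⟩
              (fun key v h => by simp [pvLook] at h)).1
            -- B side
            have hB := altLoop_eval rows columns c r rowCount hrows hC0
              (((rows - i).toNat + 1) * (columns.toNat + 2)) i j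
              [((colCount, pvGetI rowCount i), (1 : Int))]
              hi0 hilt hj0 hjc (pvMu_le_fuel rows columns i j hj0 hjc)
            have hWs : pvWsum (fun s => Gf (pvMu rows columns i j) rows columns c r i j s.1
                (rcRep rowCount i s.2)) [((colCount, pvGetI rowCount i), (1 : Int))]
                = Gf (pvMu rows columns i j) rows columns c r i j colCount
                    (rcRep rowCount i (pvGetI rowCount i)) := by
              simp [pvWsum]
            have hrep : Gf (pvMu rows columns i j) rows columns c r i j colCount
                (rcRep rowCount i (pvGetI rowCount i))
                = Gf (pvMu rows columns i j) rows columns c r i j colCount rowCount := by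
              apply Gf_agree _ _ _ _ _ _ _ _ _ _ hi0
              intro k hk
              by_cases he : i.toNat = k
              · subst he
                simp only [rcRep]
                rw [List.getElem?_set_eq_of_lt _ (by omega)]
                rw [List.getElem?_eq_getElem (by omega : i.toNat < rowCount.length)]
                congr 1
                rw [getI_of_nonneg _ _ hi0,
                  List.getElem?_eq_getElem (by omega : i.toNat < rowCount.length)]
                rfl
              · simp only [rcRep]
                rw [List.getElem?_set_ne (by omega)]
            show (aztecGo (((rows - i).toNat + 1) * (columns.toNat + 2)) rows columns c r i j
              colCount rowCount []).1 = _
            rw [hA]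
            simp only [aztec_alt, if_neg hb1, if_neg hb2, if_neg hb3, if_neg hbase]
            rw [hB, hWs, hrep]
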